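-- pv_equiv track=rewrite | github.com/meh313/youtube-mcp | main.py | get_best_thumbnail
-- ===== SOURCE A (Python) =====
-- def get_best_thumbnail(thumbnails):
--     for thumb in thumbnails or []:
--         if "maxresdefault.jpg" in thumb["url"]:
--             return thumb["url"]
--     for thumb in thumbnails or []:
--         if "hqdefault.jpg" in thumb["url"]:
--             return thumb["url"]
--     if thumbnails:
--         return thumbnails[0]["url"]
--     return None
-- ===== SOURCE B (Python) =====
-- def get_best_thumbnail(thumbnails):
--     first = None
--     hq = None
--     for thumb in thumbnails or []:
--         url = thumb["url"]
--         if "maxresdefault.jpg" in url: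
--             return url
--         if first is None:
--             first = url
--         if hq is None and "hqdefault.jpg" in url:
--             hq = url
--     return hq if hq is not None else first
-- ===== Notes on version B (the rewrite author's own statement) =====
-- stated objective: alternative
-- what changed: replaces A's two sequential scans plus an indexed fallback with a single pass that early-returns on maxres and carries first-hq/first-url state
import Mathlib
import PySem

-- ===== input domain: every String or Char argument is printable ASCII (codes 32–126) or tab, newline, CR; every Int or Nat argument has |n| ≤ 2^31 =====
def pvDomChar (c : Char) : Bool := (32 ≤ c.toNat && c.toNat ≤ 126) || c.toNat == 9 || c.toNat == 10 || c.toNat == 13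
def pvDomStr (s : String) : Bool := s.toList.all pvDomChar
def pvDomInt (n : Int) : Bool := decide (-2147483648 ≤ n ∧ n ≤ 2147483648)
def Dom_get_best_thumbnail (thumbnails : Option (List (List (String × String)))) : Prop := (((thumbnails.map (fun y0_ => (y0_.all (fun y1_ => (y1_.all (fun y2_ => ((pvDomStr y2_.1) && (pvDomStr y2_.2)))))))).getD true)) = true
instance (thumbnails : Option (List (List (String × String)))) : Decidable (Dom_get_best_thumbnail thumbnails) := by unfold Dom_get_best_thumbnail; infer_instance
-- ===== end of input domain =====

-- B is a single pass (early return on maxres, carrying first-hq / first-url state) instead of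
-- A's two sequential scans plus indexed fallback; same cost, different decomposition.

-- ===== PORT A =====
-- first loop of A: return thumb["url"] on the first url containing "maxresdefault.jpg"
def pvLoopMax : List (List (String × String)) → Option String
  | [] => none
  | t :: ts =>
      let url := PySem.Dict.getD (PySem.Dict.mk t) "url" ""   -- thumb["url"]; a missing key (KeyError) is excluded by Pre_
      if PySem.Str.isIn "maxresdefault.jpg" url then some url else pvLoopMax ts

-- second loop of A: first url containing "hqdefault.jpg"
def pvLoopHq : List (List (String × String)) → Option String
  | [] => none
  | t :: ts =>
      let url := PySem.Dict.getD (PySem.Dict.mk t) "url" ""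
      if PySem.Str.isIn "hqdefault.jpg" url then some url else pvLoopHq ts

def get_best_thumbnail (thumbnails : Option (List (List (String × String)))) : Option String :=
  let xs := thumbnails.getD []          -- 'thumbnails or []'
  match pvLoopMax xs with
  | some u => some u
  | none =>
    match pvLoopHq xs with
    | some u => some u
    | none =>
      match xs with                     -- 'if thumbnails: return thumbnails[0]["url"]'
      | t :: _ => some (PySem.Dict.getD (PySem.Dict.mk t) "url" "")
      | [] => none

-- ===== PORT B =====
-- B's single loop, carrying (first, hq) state; returns early on maxres
def pvLoopB : List (List (String × String)) → Option String → Option String → Option String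
  | [], first, hq => match hq with | some u => some u | none => first
  | t :: ts, first, hq =>
      let url := PySem.Dict.getD (PySem.Dict.mk t) "url" ""
      if PySem.Str.isIn "maxresdefault.jpg" url then some url
      else
        pvLoopB ts
          (if first.isNone then some url else first)
          (if hq.isNone && PySem.Str.isIn "hqdefault.jpg" url then some url else hq)

def get_best_thumbnail_alt (thumbnails : Option (List (List (String × String)))) : Option String :=
  pvLoopB (thumbnails.getD []) none none

-- ===== PRECONDITION & SPEC =====
-- Pre_ excludes exactly the inputs where Python raises KeyError: a thumb without a "url" key
-- reached before any thumb whose url contains "maxresdefault.jpg" (at which both return early).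
def Pre_get_best_thumbnail (thumbnails : Option (List (List (String × String)))) : Prop :=
  ((thumbnails.getD []).takeWhile
      (fun t => !(PySem.Str.isIn "maxresdefault.jpg" (PySem.Dict.getD (PySem.Dict.mk t) "url" "")))).all
    (fun t => PySem.Dict.contains (PySem.Dict.mk t) "url") = true
instance (thumbnails : Option (List (List (String × String)))) : Decidable (Pre_get_best_thumbnail thumbnails) := by unfold Pre_get_best_thumbnail; infer_instance

def pvWitness_get_best_thumbnail : (Option (List (List (String × String)))) :=
  some [[("url", "https://i.ytimg.com/vi/x/hqdefault.jpg")], [("url", "https://i.ytimg.com/vi/x/default.jpg")]]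

def Spec_get_best_thumbnail (thumbnails : Option (List (List (String × String)))) (out : Option String) : Prop := out = get_best_thumbnail_alt thumbnails
instance (thumbnails : Option (List (List (String × String)))) (out : Option String) : Decidable (Spec_get_best_thumbnail thumbnails out) := by unfold Spec_get_best_thumbnail; infer_instance

-- ===== CLAIM (what is proved, stated in full; the proofs are below) =====
def Claim_equal_get_best_thumbnail : Prop := ∀ (thumbnails : Option (List (List (String × String)))), Dom_get_best_thumbnail thumbnails → Pre_get_best_thumbnail thumbnails → Spec_get_best_thumbnail thumbnails (get_best_thumbnail thumbnails)

-- ===== LEMMAS AND PROOFS =====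
-- head url of A's final fallback
def pvFirstUrl : List (List (String × String)) → Option String
  | [] => none
  | t :: _ => some (PySem.Dict.getD (PySem.Dict.mk t) "url" "")

-- invariant of B's loop: maxres in the suffix wins; else the carried hq (first hq overall) /
-- first hq of the suffix; else the carried first url / head url of the suffix
theorem pvLoopB_eq (xs : List (List (String × String))) :
    ∀ first hq : Option String,
      pvLoopB xs first hq =
        match pvLoopMax xs with
        | some u => some u
        | none =>
          match hq with
          | some h => some h
          | none =>
            match pvLoopHq xs with
            | some u => some u
            | none => match first with
                      | some f => some f
                      | none => pvFirstUrl xs := by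
  induction xs with
  | nil =>
      intro first hq
      cases first <;> cases hq <;> simp [pvLoopB, pvLoopMax, pvLoopHq, pvFirstUrl]
  | cons t ts ih =>
      intro first hq
      simp only [pvLoopB, pvLoopMax, pvLoopHq, pvFirstUrl]
      by_cases hmax : PySem.Str.isIn "maxresdefault.jpg" (PySem.Dict.getD (PySem.Dict.mk t) "url" "") = true
      · simp only [PySem.Str.isIn_eq, String.toList] at hmax ⊢
        simp [hmax]
      · simp only [PySem.Str.isIn_eq, String.toList] at hmax ⊢
        simp only [Bool.not_eq_true] at hmax
        rw [ih]
        simp only [hmax]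
        by_cases hhq : PySem.Str.isIn "hqdefault.jpg" (PySem.Dict.getD (PySem.Dict.mk t) "url" "") = true <;>
          simp only [PySem.Str.isIn_eq, String.toList] at hhq ⊢ <;>
            cases first <;> cases hq <;>
              simp [hhq, Option.isNone]

-- ===== VERDICT (by name: the statement is the Claim_ definition above) =====
theorem get_best_thumbnail_spec : Claim_equal_get_best_thumbnail := by
  intro thumbnails _ _
  unfold Spec_get_best_thumbnail get_best_thumbnail get_best_thumbnail_alt
  rw [pvLoopB_eq]
  cases h : pvLoopMax (thumbnails.getD []) <;>
    cases h2 : pvLoopHq (thumbnails.getD []) <;>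
      cases hx : thumbnails.getD [] <;> simp_all [pvFirstUrl]
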